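-- pv_equiv track=rewrite | github.com/manv-lang/manv | manv/abi.py | _split_top_level
-- ===== SOURCE A (Python) =====
-- def _split_top_level(s: str, sep: str) -> list[str]:
--     parts: list[str] = []
--     depth = 0
--     cur: list[str] = []
--     opens = "[{("
--     closes = "]})"
--
--     for ch in s:
--         if ch in opens:
--             depth += 1
--         elif ch in closes:
--             depth = max(0, depth - 1)
--
--         if ch == sep and depth == 0:
--             part = "".join(cur).strip()
--             if part:
--                 parts.append(part)
--             cur = []
--             continue
--         cur.append(ch)
--
--     tail = "".join(cur).strip()
--     if tail:
--         parts.append(tail)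
--     return parts
-- ===== SOURCE B (Python) =====
-- def _split_top_level(s: str, sep: str) -> list[str]:
--     parts: list[str] = []
--     i = 0
--     n = len(s)
--     while True:
--         # scan from i for the next separator at bracket depth 0
--         depth = 0
--         j = i
--         while j < n:
--             ch = s[j]
--             if ch in "[{(":
--                 depth += 1
--             elif ch in "]})":
--                 depth = max(0, depth - 1)
--             if ch == sep and depth == 0:
--                 break
--             j += 1
--         piece = s[i:j].strip()
--         if piece:
--             parts.append(piece)
--         if j == n:
--             return parts
--         i = j + 1
-- ===== Notes on version B (the rewrite author's own statement) =====
-- stated objective: alternative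
-- what changed: B finds the next top-level separator position with an inner scan and slices/strips whole segments, instead of A's single fold that accumulates characters into cur and emits inline.
import Mathlib
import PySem

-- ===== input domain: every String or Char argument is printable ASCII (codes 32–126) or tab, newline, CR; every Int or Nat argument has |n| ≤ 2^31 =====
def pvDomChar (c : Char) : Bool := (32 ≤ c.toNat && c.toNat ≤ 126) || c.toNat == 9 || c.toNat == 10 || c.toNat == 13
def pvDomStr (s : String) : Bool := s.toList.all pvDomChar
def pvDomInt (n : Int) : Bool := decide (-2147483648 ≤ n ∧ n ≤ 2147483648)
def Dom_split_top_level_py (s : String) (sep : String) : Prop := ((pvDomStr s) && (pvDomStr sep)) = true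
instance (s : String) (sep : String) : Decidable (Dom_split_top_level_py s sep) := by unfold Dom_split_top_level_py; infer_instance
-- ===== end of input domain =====

-- B replaces A's char-by-char accumulator fold by a segment-at-a-time scan (find the next
-- top-level separator, slice out the segment, strip it): same results, a different decomposition.


-- ===== PORT A =====
-- shared depth update (the identical three lines appear in both Pythons)
def pvDepth (d : Int) (ch : Char) : Int :=
  if ("[{(".toList).contains ch then d + 1
  else if ("]})".toList).contains ch then max 0 (d - 1)
  else d

-- A-side helpers: the loop body and the final tail handling, exactly as in the Python
def pvStepA (sep : String) (st : List String × Int × List Char) (ch : Char) :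
    List String × Int × List Char :=
  let parts := st.1
  let cur := st.2.2
  let depth := pvDepth st.2.1 ch
  if String.ofList [ch] == sep && depth == 0 then
    let part := PySem.Chars.strip cur
    (if part ≠ [] then parts ++ [String.ofList part] else parts, depth, [])
  else
    (parts, depth, cur ++ [ch])

def pvFinishA (st : List String × Int × List Char) : List String :=
  let tail := PySem.Chars.strip st.2.2
  if tail ≠ [] then st.1 ++ [String.ofList tail] else st.1

def split_top_level_py (s : String) (sep : String) : List String :=
  pvFinishA (s.toList.foldl (pvStepA sep) ([], 0, []))

-- ===== PORT B =====
-- B-side helpers: scan for the next top-level separator, returning the segment before it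
-- and the remainder after it (none = no further separator)
def pvNextSeg (sep : String) : Int → List Char → List Char × Option (List Char)
  | _, [] => ([], none)
  | d, c :: cs =>
    let d' := pvDepth d c
    if String.ofList [c] == sep && d' == 0 then ([], some cs)
    else
      let r := pvNextSeg sep d' cs
      (c :: r.1, r.2)

-- strip a segment; keep it only if non-empty
def pvEmit (seg : List Char) : List String :=
  let p := PySem.Chars.strip seg
  if p ≠ [] then [String.ofList p] else []

-- termination lemma cited by pvGo
theorem pvNextSeg_rest_lt (sep : String) :
    ∀ (d : Int) (cs : List Char) (rest : List Char),
      (pvNextSeg sep d cs).2 = some rest → rest.length < cs.length := by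
  intro d cs
  induction cs generalizing d with
  | nil => intro rest h; simp [pvNextSeg] at h
  | cons c cs ih =>
    intro rest h
    simp only [pvNextSeg] at h
    split at h
    · simp at h; simp [h]
    · exact Nat.lt_trans (ih _ rest h) (by simp)

def pvGo (sep : String) (cs : List Char) : List String :=
  let r := pvNextSeg sep 0 cs
  match hr : r.2 with
  | none => pvEmit r.1
  | some rest => pvEmit r.1 ++ pvGo sep rest
termination_by cs.length
decreasing_by exact pvNextSeg_rest_lt sep 0 cs rest hr

def split_top_level_py_alt (s : String) (sep : String) : List String :=
  pvGo sep s.toList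

-- ===== PRECONDITION & SPEC =====
def Spec_split_top_level_py (s : String) (sep : String) (out : List String) : Prop := out = split_top_level_py_alt s sep
instance (s : String) (sep : String) (out : List String) : Decidable (Spec_split_top_level_py s sep out) := by unfold Spec_split_top_level_py; infer_instance

-- ===== CLAIM (what is proved, stated in full; the proofs are below) =====
def Claim_equal_split_top_level_py : Prop := ∀ (s : String) (sep : String), Dom_split_top_level_py s sep → Spec_split_top_level_py s sep (split_top_level_py s sep)

-- ===== LEMMAS AND PROOFS =====

theorem pvGo_none (sep : String) (cs : List Char)
    (h : (pvNextSeg sep 0 cs).2 = none) :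
    pvGo sep cs = pvEmit (pvNextSeg sep 0 cs).1 := by
  rw [pvGo]; split <;> simp_all

theorem pvGo_some (sep : String) (cs rest : List Char)
    (h : (pvNextSeg sep 0 cs).2 = some rest) :
    pvGo sep cs = pvEmit (pvNextSeg sep 0 cs).1 ++ pvGo sep rest := by
  rw [pvGo]; split <;> simp_all

theorem pv_key (sep : String) :
    ∀ (cs : List Char) (d : Int) (parts : List String) (cur : List Char),
      pvFinishA (cs.foldl (pvStepA sep) (parts, d, cur))
        = parts ++ (match (pvNextSeg sep d cs).2 with
            | none => pvEmit (cur ++ (pvNextSeg sep d cs).1)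
            | some rest => pvEmit (cur ++ (pvNextSeg sep d cs).1) ++ pvGo sep rest) := by
  intro cs
  induction cs with
  | nil =>
    intro d parts cur
    simp [pvNextSeg, pvFinishA, pvEmit]
    split <;> simp
  | cons c cs ih =>
    intro d parts cur
    simp only [List.foldl_cons, pvStepA, pvNextSeg]
    by_cases hc : (String.ofList [c] == sep && pvDepth d c == 0) = true
    · have hd0 : pvDepth d c = 0 := beq_iff_eq.mp ((Bool.and_eq_true _ _).mp hc).2
      rw [if_pos hc, if_pos hc, hd0]
      rw [ih 0 _ []]
      cases h2 : (pvNextSeg sep 0 cs).2 with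
      | none =>
        simp only [pvGo_none sep cs h2, List.nil_append, List.append_nil, pvEmit]
        split <;> simp_all
      | some rest =>
        simp only [pvGo_some sep cs rest h2, List.nil_append, List.append_nil, pvEmit]
        split <;> simp_all
    · rw [if_neg hc, if_neg hc]
      rw [ih (pvDepth d c) parts (cur ++ [c])]
      cases h2 : (pvNextSeg sep (pvDepth d c) cs).2 with
      | none => simp
      | some rest => simp

-- ===== VERDICT (by name: the statement is the Claim_ definition above) =====
theorem split_top_level_py_spec : Claim_equal_split_top_level_py := by
  intro s sep _
  unfold Spec_split_top_level_py split_top_level_py split_top_level_py_alt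
  rw [pv_key sep s.toList 0 [] []]
  cases h2 : (pvNextSeg sep 0 s.toList).2 with
  | none => rw [pvGo_none sep _ h2]; simp
  | some rest => rw [pvGo_some sep _ rest h2]; simp
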